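-- pv_equiv track=rewrite | github.com/vijayharshamade/Python-Problem-Solving | MATHS CONTEST.py | get_minimum_possible_number_to_get__prime_number
-- ===== SOURCE A (Python) =====
-- def get_minimum_possible_number_to_get__prime_number(a,b):
--     if (a == 0) and (b == 0):
--         return 1
--     k = a + b
--     for i in range(1, k): #4
--         minimum_possible_number = k + i #11
--         minimum_possible_number_list = []
--         for j in range(2, minimum_possible_number):
--             if (minimum_possible_number % j) == 0:
--                 minimum_possible_number_list.append(minimum_possible_number)
--                 break
--         if len(minimum_possible_number_list) == 0:
--             return i
-- ===== SOURCE B (Python) =====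
-- def _is_prime(m):
--     if m < 2:
--         return False
--     if m % 2 == 0:
--         return m == 2
--     d = 3
--     while d * d <= m:
--         if m % d == 0:
--             return False
--         d += 2
--     return True
--
-- def get_minimum_possible_number_to_get__prime_number(a, b):
--     if a == 0 and b == 0:
--         return 1
--     k = a + b
--     for i in range(1, k):
--         if _is_prime(k + i):
--             return i
--     return None
-- ===== Notes on version B (the rewrite author's own statement) =====
-- stated objective: faster
-- what changed: B replaces A's full divisor scan up to m with a clean primality helper that handles evens once and trial-divides only by odd d with d*d <= m, dropping A's list/break idiom.
import Mathlib
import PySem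

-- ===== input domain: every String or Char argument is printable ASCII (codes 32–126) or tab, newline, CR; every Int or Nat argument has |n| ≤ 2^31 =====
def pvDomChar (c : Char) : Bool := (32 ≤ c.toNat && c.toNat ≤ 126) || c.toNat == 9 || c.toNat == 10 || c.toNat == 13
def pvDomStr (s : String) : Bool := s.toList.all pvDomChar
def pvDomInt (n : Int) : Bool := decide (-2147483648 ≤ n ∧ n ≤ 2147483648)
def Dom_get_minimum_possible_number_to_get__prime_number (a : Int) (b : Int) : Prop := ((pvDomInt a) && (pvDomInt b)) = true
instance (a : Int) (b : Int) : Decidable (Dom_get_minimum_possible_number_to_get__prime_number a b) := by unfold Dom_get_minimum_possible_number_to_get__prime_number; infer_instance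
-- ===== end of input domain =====

-- B replaces A's full divisor scan (j = 2..m-1) with trial division by odd d, d*d ≤ m: asymptotically faster, same result.

-- ===== PORT A =====
-- inner loop: for j in range(2, m): if m % j == 0: append m; break
def pvInnerA (m : Int) : List Int → List Int
  | [] => []
  | j :: rest => if PySem.Int.mod m j == 0 then [m] else pvInnerA m rest

-- outer loop: for i in range(1, k) with early return
def pvOuterA (k : Int) : List Int → Option Int
  | [] => none
  | i :: rest =>
      let mpn := k + i
      let lst := pvInnerA mpn (PySem.List.pyRange 2 mpn 1)
      if lst.length == 0 then some i else pvOuterA k rest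

def get_minimum_possible_number_to_get__prime_number (a : Int) (b : Int) : Option Int :=
  if a == 0 && b == 0 then some 1
  else pvOuterA (a + b) (PySem.List.pyRange 1 (a + b) 1)

-- ===== PORT B =====
-- while d * d <= m: if m % d == 0: return False; d += 2
def pvTrialLoop (m : Int) (d : Int) : Bool :=
  if h : d * d ≤ m then
    if PySem.Int.mod m d == 0 then false else pvTrialLoop m (d + 2)
  else true
termination_by (m + 1 - d).toNat
decreasing_by
  have hd : d ≤ d * d := by
    rcases le_or_gt d 0 with h' | h'
    · nlinarith
    · nlinarith
  omega

def pvIsPrime (m : Int) : Bool :=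
  if m < 2 then false
  else if PySem.Int.mod m 2 == 0 then m == 2
  else pvTrialLoop m 3

def pvOuterB (k : Int) : List Int → Option Int
  | [] => none
  | i :: rest => if pvIsPrime (k + i) then some i else pvOuterB k rest

def get_minimum_possible_number_to_get__prime_number_alt (a : Int) (b : Int) : Option Int :=
  if a == 0 && b == 0 then some 1
  else pvOuterB (a + b) (PySem.List.pyRange 1 (a + b) 1)

-- ===== PRECONDITION & SPEC =====
def Spec_get_minimum_possible_number_to_get__prime_number (a : Int) (b : Int) (out : Option Int) : Prop := out = get_minimum_possible_number_to_get__prime_number_alt a b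
instance (a : Int) (b : Int) (out : Option Int) : Decidable (Spec_get_minimum_possible_number_to_get__prime_number a b out) := by unfold Spec_get_minimum_possible_number_to_get__prime_number; infer_instance

-- ===== CLAIM (what is proved, stated in full; the proofs are below) =====
def Claim_equal_get_minimum_possible_number_to_get__prime_number : Prop := ∀ (a : Int) (b : Int), Dom_get_minimum_possible_number_to_get__prime_number a b → Spec_get_minimum_possible_number_to_get__prime_number a b (get_minimum_possible_number_to_get__prime_number a b)

-- ===== LEMMAS AND PROOFS =====

lemma pvInnerA_eq_nil_iff (m : Int) (l : List Int) :
    pvInnerA m l = [] ↔ ∀ j ∈ l, ¬ j ∣ m := by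
  induction l with
  | nil => simp [pvInnerA]
  | cons j rest ih =>
    by_cases h : j ∣ m
    · have hm : PySem.Int.mod m j = 0 := (PySem.Int.mod_eq_zero_iff_dvd m j).mpr h
      simp [pvInnerA, hm, h]
    · have hm : ¬ PySem.Int.mod m j = 0 := fun e => h ((PySem.Int.mod_eq_zero_iff_dvd m j).mp e)
      simp [pvInnerA, hm, ih, h]

lemma pvTrialLoop_iff (m : Int) :
    ∀ N (d : Int), (m + 1 - d).toNat = N → 1 ≤ d →
      (pvTrialLoop m d = true ↔ ∀ e, d ≤ e → e * e ≤ m → (e - d) % 2 = 0 → ¬ e ∣ m) := by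
  intro N
  induction N using Nat.strong_induction_on with
  | _ N ih =>
    intro d hN hd
    rw [pvTrialLoop]
    by_cases h : d * d ≤ m
    · have hdm : d ≤ m := by nlinarith
      by_cases hdvd : d ∣ m
      · have hm : PySem.Int.mod m d = 0 := (PySem.Int.mod_eq_zero_iff_dvd m d).mpr hdvd
        simp only [h, dif_pos, hm, beq_self_eq_true, if_true]
        constructor
        · intro hfalse; exact absurd hfalse (by simp)
        · intro hall
          exact absurd hdvd (hall d le_rfl h (by omega))
      · have hm : ¬ PySem.Int.mod m d = 0 := fun e => hdvd ((PySem.Int.mod_eq_zero_iff_dvd m d).mp e)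
        simp only [h, dif_pos, beq_iff_eq, hm, if_false]
        rw [ih (m + 1 - (d + 2)).toNat (by omega) (d + 2) rfl (by omega)]
        constructor
        · intro H e hde hem hpar
          rcases eq_or_lt_of_le hde with rfl | hlt
          · exact hdvd
          · exact H e (by omega) hem (by omega)
        · intro H e hde hem hpar
          exact H e (by omega) hem (by omega)
    · simp only [h, dif_neg, not_false_iff, true_iff]
      intro e hde hem _
      have : d * d ≤ e * e := mul_self_le_mul_self (by omega) hde
      omega

-- the square-root bound is complete: a proper divisor yields one with e*e ≤ m
lemma small_divisor (m j : Int) (hm : 3 ≤ m) (hj2 : 2 ≤ j) (hjm : j < m) (hdvd : j ∣ m) :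
    ∃ e, 2 ≤ e ∧ e * e ≤ m ∧ e ∣ m := by
  obtain ⟨q, hq⟩ := hdvd
  have hq2 : 2 ≤ q := by nlinarith
  rcases le_total q j with hle | hle
  · exact ⟨q, hq2, by nlinarith, Dvd.intro j (by linarith [hq])⟩
  · exact ⟨j, hj2, by nlinarith, ⟨q, hq⟩⟩

-- for odd m ≥ 3: "no divisor in [2,m)" ↔ "no odd divisor e ≥ 3 with e*e ≤ m"
lemma bridge (m : Int) (hm : 3 ≤ m) (hodd : ¬ (2:Int) ∣ m) :
    (∀ j, 2 ≤ j → j < m → ¬ j ∣ m) ↔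
    (∀ e, 3 ≤ e → e * e ≤ m → (e - 3) % 2 = 0 → ¬ e ∣ m) := by
  constructor
  · intro H e he3 hem _ hdvd
    exact H e (by omega) (by nlinarith) hdvd
  · intro H j hj2 hjm hdvd
    obtain ⟨e, he2, hem, hedvd⟩ := small_divisor m j hm hj2 hjm hdvd
    have heodd : ¬ (2:Int) ∣ e := fun h => hodd (h.trans hedvd)
    exact H e (by omega) hem (by omega) hedvd

-- A's inner test equals B's primality test, for every m ≥ 3
lemma test_eq (m : Int) (hm : 3 ≤ m) :
    ((pvInnerA m (PySem.List.pyRange 2 m 1)).length == 0) = pvIsPrime m := by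
  have hnil : (pvInnerA m (PySem.List.pyRange 2 m 1) = []) ↔ ∀ j, 2 ≤ j → j < m → ¬ j ∣ m := by
    rw [pvInnerA_eq_nil_iff]
    constructor
    · intro H j h1 h2; exact H j (PySem.List.mem_pyRange_one.mpr ⟨h1, h2⟩)
    · intro H j hj
      obtain ⟨h1, h2⟩ := PySem.List.mem_pyRange_one.mp hj
      exact H j h1 h2
  by_cases h2 : (2:Int) ∣ m
  · -- even m ≥ 3: both sides false
    have hL : ¬ pvInnerA m (PySem.List.pyRange 2 m 1) = [] := by
      rw [hnil]; exact fun H => H 2 le_rfl (by omega) h2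
    have hmod : PySem.Int.mod m 2 = 0 := (PySem.Int.mod_eq_zero_iff_dvd m 2).mpr h2
    have hR : pvIsPrime m = false := by
      rw [pvIsPrime, if_neg (show ¬ m < 2 by omega), if_pos (show (PySem.Int.mod m 2 == 0) = true by simpa using h2)]
      exact beq_eq_false_iff_ne.mpr (by omega)
    rw [hR]
    exact beq_eq_false_iff_ne.mpr (fun h => hL (List.length_eq_zero_iff.mp h))
  · -- odd m ≥ 3
    have hmod : ¬ PySem.Int.mod m 2 = 0 := fun e => h2 ((PySem.Int.mod_eq_zero_iff_dvd m 2).mp e)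
    have hR : pvIsPrime m = pvTrialLoop m 3 := by
      rw [pvIsPrime, if_neg (show ¬ m < 2 by omega), if_neg (show ¬ (PySem.Int.mod m 2 == 0) = true by simp; omega)]
    rw [hR, Bool.eq_iff_iff]
    rw [pvTrialLoop_iff m (m + 1 - 3).toNat 3 rfl (by omega)]
    simp only [beq_iff_eq, List.length_eq_zero_iff]
    rw [hnil]
    exact bridge m hm h2

lemma outer_eq (k : Int) (l : List Int) (h : ∀ i ∈ l, 3 ≤ k + i) :
    pvOuterA k l = pvOuterB k l := by
  induction l with
  | nil => rfl
  | cons i rest ih =>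
    have h3 : 3 ≤ k + i := h i (List.mem_cons_self)
    rw [pvOuterA, pvOuterB, test_eq (k + i) h3]
    by_cases hp : pvIsPrime (k + i) = true
    · simp [hp]
    · simp only [Bool.not_eq_true] at hp
      simp [hp]
      exact ih (fun j hj => h j (List.mem_cons_of_mem _ hj))

-- ===== VERDICT (by name: the statement is the Claim_ definition above) =====
theorem get_minimum_possible_number_to_get__prime_number_spec : Claim_equal_get_minimum_possible_number_to_get__prime_number := by
  intro a b _
  unfold Spec_get_minimum_possible_number_to_get__prime_number
  unfold get_minimum_possible_number_to_get__prime_number get_minimum_possible_number_to_get__prime_number_alt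
  by_cases h0 : (a == 0 && b == 0) = true
  · simp [h0]
  · simp only [h0]
    apply outer_eq
    intro i hi
    obtain ⟨h1, h2⟩ := PySem.List.mem_pyRange_one.mp hi
    omega
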